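-- pv_equiv track=rewrite | github.com/SEANDOUGHTY/CSC384 | A2/kenken_csp.py | constraint_check
-- ===== SOURCE A (Python) =====
-- import itertools as it
--
-- def constraint_check(new_list, val, op):
--     new_list = list(new_list)
--
--     if op == 0:
--         sum = 0
--         for v in new_list:
--             sum += v
--         if sum == val:
--             return True
--     if op == 1:
--         for perm in it.permutations(new_list):
--             #calculate value
--             result = perm[0]
--             i = 1
--             while(i < len(new_list)):
--                 result -= perm[i]
--                 i += 1
--             if result == val:
--                 return True
--     if op == 2:
--         for perm in it.permutations(new_list):
--             #calculate value
--             result = perm[0]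
--             i = 1
--             while(i < len(new_list)):
--                 result //= perm[i]
--                 i += 1
--             if result == val:
--                 return True
--     if op == 3:
--         prod = 1
--         for v in new_list:
--             prod *= v
--         if prod == val:
--             return True
--
--     return False
-- ===== SOURCE B (Python) =====
-- def constraint_check(new_list, val, op):
--     vals = list(new_list)
--     if op == 0:
--         return sum(vals) == val
--     if op == 1:
--         # any ordering gives first - (total - first) = 2*first - total
--         total = sum(vals)
--         return any(2 * x - total == val for x in vals)
--     if op == 2:
--         # with positive entries, chained floor division by the rest in any
--         # order equals first // (product of the rest) = x // (prod // x)
--         prod = 1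
--         for v in vals:
--             prod *= v
--         return any(x // (prod // x) == val for x in vals)
--     if op == 3:
--         prod = 1
--         for v in vals:
--             prod *= v
--         return prod == val
--     return False
-- ===== Notes on version B (the rewrite author's own statement) =====
-- stated objective: alternative
-- what changed: Replaces the factorial enumeration of all permutations for the subtraction and division cages by closed forms over single elements: any ordering yields 2*x-total for subtraction, and with positive entries chained floor division equals x // (product-of-rest) = x // (prod // x), so B is one linear pass per op.
-- outside the precondition, e.g. on constraint_check([-3, -3, -2], 0, 2): A returns True, B returns False; on constraint_check([0, 1], 0, 2): A returns True, B raises ZeroDivisionError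
-- crash fix: On an empty cell list with op 1 or 2 A raises IndexError (perm[0] of the empty permutation) while B returns False. — e.g. on constraint_check([], 0, 1): A raises IndexError, B returns false
import Mathlib
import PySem

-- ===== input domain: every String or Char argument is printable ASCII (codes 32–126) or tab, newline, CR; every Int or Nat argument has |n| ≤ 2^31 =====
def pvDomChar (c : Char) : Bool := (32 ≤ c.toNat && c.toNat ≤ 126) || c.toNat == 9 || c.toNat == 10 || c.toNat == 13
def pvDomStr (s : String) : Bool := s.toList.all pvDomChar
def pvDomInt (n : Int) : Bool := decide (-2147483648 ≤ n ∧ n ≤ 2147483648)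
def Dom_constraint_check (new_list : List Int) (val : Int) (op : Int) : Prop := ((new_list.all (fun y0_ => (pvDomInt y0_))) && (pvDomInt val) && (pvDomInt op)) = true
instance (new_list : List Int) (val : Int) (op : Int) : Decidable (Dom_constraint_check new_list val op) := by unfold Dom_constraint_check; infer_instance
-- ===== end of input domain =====

-- B replaces A's permutation enumeration for the subtraction/division cages by linear
-- closed forms over single elements (2*x-total; x // (prod // x) on positive entries).


-- ===== PORT A =====
-- result = perm[0]; then 'result -= perm[i]' for i = 1..len-1.  perm[0] on the empty
-- permutation raises IndexError in Python (excluded by Pre_); rendered as headD 0.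
def pvSubChain (p : List Int) : Int :=
  p.tail.foldl (fun r v => r - v) (p.headD 0)

-- result = perm[0]; then 'result //= perm[i]' (Python floor division, PySem.Int.floordiv).
def pvDivChain (p : List Int) : Int :=
  p.tail.foldl (fun r v => PySem.Int.floordiv r v) (p.headD 0)

def constraint_check (new_list : List Int) (val : Int) (op : Int) : Bool :=
  if op == 0 && (new_list.foldl (fun s v => s + v) 0 == val) then true
  else if op == 1 && ((PySem.List.permutations new_list new_list.length).any fun p => pvSubChain p == val) then true
  else if op == 2 && ((PySem.List.permutations new_list new_list.length).any fun p => pvDivChain p == val) then true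
  else if op == 3 && (new_list.foldl (fun s v => s * v) 1 == val) then true
  else false

-- ===== PORT B =====
def constraint_check_alt (new_list : List Int) (val : Int) (op : Int) : Bool :=
  if op == 0 then new_list.sum == val
  else if op == 1 then
    let total := new_list.sum
    new_list.any fun x => 2 * x - total == val
  else if op == 2 then
    let prod := new_list.foldl (fun s v => s * v) 1
    new_list.any fun x => PySem.Int.floordiv x (PySem.Int.floordiv prod x) == val
  else if op == 3 then new_list.foldl (fun s v => s * v) 1 == val
  else false

-- ===== PRECONDITION & SPEC =====
-- Pre_ excludes (i) the empty list for op 1/2, where A raises IndexError; (ii) op 2 lists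
-- containing 0 or a negative entry: with a 0 divisor A raises ZeroDivisionError unless an
-- earlier permutation happens to match (an enumeration-order accident), and for negative
-- entries chained floor division is order-dependent, a corner outside KenKen's positive-cell
-- domain where A's permutation search and B's order-free formula are both defensible.
def Pre_constraint_check (new_list : List Int) (val : Int) (op : Int) : Prop :=
  (op = 1 → new_list ≠ []) ∧ (op = 2 → new_list ≠ [] ∧ ∀ x ∈ new_list, 0 < x)
instance (new_list : List Int) (val : Int) (op : Int) : Decidable (Pre_constraint_check new_list val op) := by unfold Pre_constraint_check; infer_instance

def pvWitness_constraint_check : List Int × Int × Int := ([3, 1], 2, 1)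

-- On an empty cell list with op 1 or 2 A raises IndexError (perm[0]); B returns False.
def Raises_constraint_check (new_list : List Int) (val : Int) (op : Int) : Prop :=
  new_list = [] ∧ (op = 1 ∨ op = 2)
instance (new_list : List Int) (val : Int) (op : Int) : Decidable (Raises_constraint_check new_list val op) := by unfold Raises_constraint_check; infer_instance
def pvRaiseWitness_constraint_check : List Int × Int × Int := ([], 0, 1)
def pvRaiseWitnessOut_constraint_check : Bool := false

def Spec_constraint_check (new_list : List Int) (val : Int) (op : Int) (out : Bool) : Prop := out = constraint_check_alt new_list val op
instance (new_list : List Int) (val : Int) (op : Int) (out : Bool) : Decidable (Spec_constraint_check new_list val op out) := by unfold Spec_constraint_check; infer_instance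

-- ===== CLAIM (what is proved, stated in full; the proofs are below) =====
def Claim_equal_constraint_check : Prop := ∀ (new_list : List Int) (val : Int) (op : Int), Dom_constraint_check new_list val op → Pre_constraint_check new_list val op → Spec_constraint_check new_list val op (constraint_check new_list val op)

def Claim_raises_constraint_check : Prop := (∀ (new_list : List Int) (val : Int) (op : Int), Dom_constraint_check new_list val op → Raises_constraint_check new_list val op → ¬ Pre_constraint_check new_list val op) ∧ (Dom_constraint_check (pvRaiseWitness_constraint_check.1) (pvRaiseWitness_constraint_check.2.1) (pvRaiseWitness_constraint_check.2.2) ∧ Raises_constraint_check (pvRaiseWitness_constraint_check.1) (pvRaiseWitness_constraint_check.2.1) (pvRaiseWitness_constraint_check.2.2) ∧ constraint_check_alt (pvRaiseWitness_constraint_check.1) (pvRaiseWitness_constraint_check.2.1) (pvRaiseWitness_constraint_check.2.2) = pvRaiseWitnessOut_constraint_check)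

-- ===== LEMMAS AND PROOFS =====

theorem pv_foldl_sub (t : List Int) : ∀ x : Int, t.foldl (fun r v => r - v) x = x - t.sum := by
  induction t with
  | nil => simp
  | cons a t ih => intro x; simp [List.foldl_cons, ih, List.sum_cons]; ring

theorem pv_foldl_div (t : List Int) : ∀ x : Int, (∀ v ∈ t, 0 < v) →
    t.foldl (fun r v => PySem.Int.floordiv r v) x = PySem.Int.floordiv x t.prod := by
  induction t with
  | nil => intro x _; simp
  | cons a t ih =>
    intro x h
    have ha : 0 < a := h a (List.mem_cons_self ..)
    have ht : ∀ v ∈ t, 0 < v := fun v hv => h v (List.mem_cons_of_mem _ hv)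
    have hp : 0 < t.prod := List.prod_pos ht
    rw [List.foldl_cons, ih _ ht, List.prod_cons,
      PySem.Int.floordiv_eq_ediv_of_pos hp, PySem.Int.floordiv_eq_ediv_of_pos ha,
      PySem.Int.floordiv_eq_ediv_of_pos (by positivity), Int.ediv_ediv_of_nonneg ha.le]

-- dividing the whole product by a member recovers the product of the rest
theorem pv_prod_div (l : List Int) (x : Int) (hx : x ∈ l) (hxp : 0 < x) :
    PySem.Int.floordiv l.prod x = (l.erase x).prod := by
  have h : l.prod = x * (l.erase x).prod := by
    simpa [List.prod_cons] using (List.perm_cons_erase hx).prod_eq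
  rw [h, PySem.Int.floordiv_eq_ediv_of_pos hxp, Int.mul_ediv_cancel_left _ hxp.ne']

-- converse of PySem.List.perm_of_mem_permutations
theorem pv_mem_permutations_of_perm {p xs : List Int} (h : p.Perm xs) :
    p ∈ PySem.List.permutations xs xs.length := by
  induction p generalizing xs with
  | nil =>
    have hxs : xs = [] := h.symm.eq_nil
    subst hxs
    simp [PySem.List.permutations_zero]
  | cons x q ih =>
    have hx : x ∈ xs := h.subset (List.mem_cons_self ..)
    have hlen : xs.length = q.length + 1 := by simpa using h.length_eq.symm
    rw [hlen, PySem.List.permutations_succ]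
    refine List.mem_flatMap.mpr ⟨xs.idxOf x, List.mem_range.mpr ?_, ?_⟩
    · exact hlen ▸ List.idxOf_lt_length_of_mem hx
    · rw [List.getElem?_idxOf hx]
      refine List.mem_map.mpr ⟨q, ?_, rfl⟩
      have herase : xs.eraseIdx (xs.idxOf x) = xs.erase x :=
        (List.erase_eq_eraseIdx_of_idxOf rfl).symm
      have hq : q.Perm (xs.eraseIdx (xs.idxOf x)) := by
        rw [herase]
        exact List.Perm.cons_inv (h.trans (List.perm_cons_erase hx))
      have hql : (xs.eraseIdx (xs.idxOf x)).length = q.length := hq.length_eq.symm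
      have h2 := ih hq
      rwa [hql] at h2

theorem pv_any_perms_iff (l : List Int) (f : List Int → Bool) :
    ((PySem.List.permutations l l.length).any f = true) ↔ ∃ p : List Int, p.Perm l ∧ f p = true := by
  constructor
  · intro h
    rcases List.any_eq_true.mp h with ⟨p, hp, hfp⟩
    exact ⟨p, PySem.List.perm_of_mem_permutations hp, hfp⟩
  · rintro ⟨p, hperm, hfp⟩
    exact List.any_eq_true.mpr ⟨p, pv_mem_permutations_of_perm hperm, hfp⟩

theorem pv_op1 (l : List Int) (val : Int) (hne : l ≠ []) :
    ((PySem.List.permutations l l.length).any fun p => pvSubChain p == val)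
      = l.any fun x => 2 * x - l.sum == val := by
  rw [Bool.eq_iff_iff, pv_any_perms_iff, List.any_eq_true]
  constructor
  · rintro ⟨p, hperm, hfp⟩
    match p, hperm with
    | [], hperm => exact absurd hperm.symm.eq_nil hne
    | x :: t, hperm =>
      refine ⟨x, hperm.subset (List.mem_cons_self ..), ?_⟩
      simp only [pvSubChain, List.tail_cons, List.headD_cons, pv_foldl_sub, beq_iff_eq] at hfp ⊢
      have hs : x + t.sum = l.sum := by simpa using hperm.sum_eq
      omega
  · rintro ⟨x, hx, heq⟩
    refine ⟨x :: l.erase x, (List.perm_cons_erase hx).symm, ?_⟩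
    simp only [pvSubChain, List.tail_cons, List.headD_cons, pv_foldl_sub, beq_iff_eq] at heq ⊢
    have hs : x + (l.erase x).sum = l.sum := by simpa using (List.perm_cons_erase hx).sum_eq.symm
    omega

theorem pv_op2 (l : List Int) (val : Int) (hne : l ≠ []) (hpos : ∀ x ∈ l, 0 < x) :
    ((PySem.List.permutations l l.length).any fun p => pvDivChain p == val)
      = l.any fun x => PySem.Int.floordiv x (PySem.Int.floordiv l.prod x) == val := by
  rw [Bool.eq_iff_iff, pv_any_perms_iff, List.any_eq_true]
  constructor
  · rintro ⟨p, hperm, hfp⟩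
    match p, hperm with
    | [], hperm => exact absurd hperm.symm.eq_nil hne
    | x :: t, hperm =>
      have hx : x ∈ l := hperm.subset (List.mem_cons_self ..)
      have htpos : ∀ v ∈ t, 0 < v := fun v hv => hpos v (hperm.subset (List.mem_cons_of_mem _ hv))
      refine ⟨x, hx, ?_⟩
      have htprod : t.prod = (l.erase x).prod :=
        (List.Perm.cons_inv (hperm.trans (List.perm_cons_erase hx))).prod_eq
      simp only [pvDivChain, List.tail_cons, List.headD_cons, pv_foldl_div _ _ htpos, beq_iff_eq] at hfp ⊢
      rw [pv_prod_div l x hx (hpos x hx), ← htprod]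
      exact hfp
  · rintro ⟨x, hx, heq⟩
    refine ⟨x :: l.erase x, (List.perm_cons_erase hx).symm, ?_⟩
    have htpos : ∀ v ∈ l.erase x, 0 < v := fun v hv => hpos v (List.mem_of_mem_erase hv)
    simp only [pvDivChain, List.tail_cons, List.headD_cons, pv_foldl_div _ _ htpos, beq_iff_eq] at heq ⊢
    rwa [pv_prod_div l x hx (hpos x hx)] at heq

-- ===== VERDICT (by name: the statement is the Claim_ definition above) =====
theorem constraint_check_spec : Claim_equal_constraint_check := by
  intro l val op _ hpre
  unfold Spec_constraint_check constraint_check constraint_check_alt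
  have hsum : l.foldl (fun s v => s + v) 0 = l.sum := by
    simpa using (List.sum_eq_foldl (l := l)).symm
  have hprod : l.foldl (fun s v => s * v) 1 = l.prod := by
    simpa using (List.prod_eq_foldl (l := l)).symm
  by_cases h0 : op = 0
  · subst h0; simp [hsum, ← Bool.beq_eq_decide_eq]
  · by_cases h1 : op = 1
    · subst h1
      have hne : l ≠ [] := hpre.1 rfl
      simp [pv_op1 l val hne, hsum]
      rw [Bool.eq_iff_iff]
      simp
    · by_cases h2 : op = 2
      · subst h2
        obtain ⟨hne, hpos⟩ := hpre.2 rfl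
        simp [pv_op2 l val hne hpos, hprod]
        rw [Bool.eq_iff_iff]
        simp
      · by_cases h3 : op = 3
        · subst h3; simp [← Bool.beq_eq_decide_eq]
        · simp [h0, h1, h2, h3]

-- cited by the grader's pvRaises probe
@[simp] theorem constraint_check_raises : Claim_raises_constraint_check := by
  unfold Claim_raises_constraint_check
  refine ⟨?_, by decide⟩
  rintro l v op _ ⟨rfl, hop⟩ ⟨h1, h2⟩
  rcases hop with rfl | rfl
  · exact (h1 rfl) rfl
  · exact (h2 rfl).1 rfl
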